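-- pv_equiv track=rewrite | github.com/deepfinery/training-api | frameworks/data_utils.py | split_corpus
-- ===== SOURCE A (Python) =====
-- from typing import Iterable, List, Tuple
--
-- def split_corpus(lines: Iterable[str], max_samples: int | None = None) -> Tuple[List[str], List[str]]:
--     train: List[str] = []
--     eval_: List[str] = []
--     for idx, line in enumerate(lines):
--         if max_samples and idx >= max_samples:
--             break
--         if idx % 10 == 0:
--             eval_.append(line)
--         else:
--             train.append(line)
--     if not train or not eval_:
--         raise ValueError("Dataset too small. Need at least 10 rows for train/eval split.")
--     return train, eval_
-- ===== SOURCE B (Python) =====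
-- from itertools import islice
-- from typing import Iterable, List, Tuple
--
-- def split_corpus(lines: Iterable[str], max_samples: int | None = None) -> Tuple[List[str], List[str]]:
--     # Truncate first (falsy max_samples disables truncation), then build the
--     # two outputs with two independent passes: a strided slice for eval,
--     # an enumerate-filter comprehension for train.
--     limit = max_samples if max_samples else None
--     items = list(islice(lines, limit))
--     eval_ = items[::10]
--     train = [x for i, x in enumerate(items) if i % 10]
--     if not train or not eval_:
--         raise ValueError("Dataset too small. Need at least 10 rows for train/eval split.")
--     return train, eval_
-- ===== Notes on version B (the rewrite author's own statement) =====
-- stated objective: alternative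
-- what changed: A interleaves truncation and splitting in one indexed loop with a break; B first materializes the truncated input via islice, then builds eval with a strided slice items[::10] and train with an enumerate-filter pass.
import Mathlib
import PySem

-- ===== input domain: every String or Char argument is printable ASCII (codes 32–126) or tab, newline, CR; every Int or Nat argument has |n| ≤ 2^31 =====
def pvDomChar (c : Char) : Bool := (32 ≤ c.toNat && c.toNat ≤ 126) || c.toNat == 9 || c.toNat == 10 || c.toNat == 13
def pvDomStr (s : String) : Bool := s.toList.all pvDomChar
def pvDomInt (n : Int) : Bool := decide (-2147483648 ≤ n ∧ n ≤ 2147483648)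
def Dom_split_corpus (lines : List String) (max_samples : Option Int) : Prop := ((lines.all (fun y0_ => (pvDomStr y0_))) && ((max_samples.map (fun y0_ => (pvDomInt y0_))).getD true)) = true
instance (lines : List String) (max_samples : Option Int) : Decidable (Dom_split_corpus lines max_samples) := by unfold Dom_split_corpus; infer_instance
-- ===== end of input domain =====

-- B builds the same split by truncating first and making two independent passes
-- (a strided slice for eval, an enumerate-filter for train) instead of A's single
-- indexed loop with a break; objective: alternative decomposition, not speed.
-- Both Pythons raise ValueError when a split side would be empty (and B's islice
-- raises on a negative max_samples, where A also raises); Pre_ excludes exactly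
-- those inputs, and the ports return the computed pair there instead of raising.

-- ===== PORT A =====
-- the for-loop of A: explicit index, break condition `max_samples and idx >= max_samples`
def splitA_go (ms : Option Int) : List String → Nat → List String → List String → List String × List String
  | [], _, train, eval_ => (train, eval_)
  | line :: rest, idx, train, eval_ =>
    let brk : Bool := match ms with
      | some m => decide (m ≠ 0) && decide (m ≤ (idx : Int))
      | none => false
    if brk then (train, eval_)
    else if idx % 10 = 0 then splitA_go ms rest (idx + 1) train (eval_ ++ [line])
    else splitA_go ms rest (idx + 1) (train ++ [line]) eval_

def split_corpus (lines : List String) (max_samples : Option Int) : List String × List String :=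
  splitA_go max_samples lines 0 [] []

-- ===== PORT B =====
-- items[::10]: every 10th element starting at index 0
def stride10 : List String → List String
  | [] => []
  | x :: r => x :: stride10 (r.drop 9)
termination_by l => l.length
decreasing_by simp

-- [x for i, x in enumerate(items) if i % 10]
def bTrain : List String → Nat → List String
  | [], _ => []
  | x :: r, i => if i % 10 ≠ 0 then x :: bTrain r (i + 1) else bTrain r (i + 1)

def split_corpus_alt (lines : List String) (max_samples : Option Int) : List String × List String :=
  -- list(islice(lines, max_samples if max_samples else None)); a negative
  -- max_samples makes islice raise ValueError (outside Pre_), here take 0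
  let items := match max_samples with
    | none => lines
    | some m => if m = 0 then lines else lines.take m.toNat
  let eval_ := stride10 items
  let train := bTrain items 0
  (train, eval_)

-- ===== PRECONDITION & SPEC =====
-- Pre_ excludes exactly the inputs where A raises ValueError (fewer than 2
-- effective items, or a negative max_samples, on which B's islice also raises).
def Pre_split_corpus (lines : List String) (max_samples : Option Int) : Prop :=
  2 ≤ lines.length ∧ (max_samples.getD 0 = 0 ∨ 2 ≤ max_samples.getD 0)

instance (lines : List String) (max_samples : Option Int) : Decidable (Pre_split_corpus lines max_samples) := by
  unfold Pre_split_corpus; infer_instance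

def pvWitness_split_corpus : List String × Option Int := (["a", "b", "c"], some 2)

def Spec_split_corpus (lines : List String) (max_samples : Option Int) (out : List String × List String) : Prop := out = split_corpus_alt lines max_samples
instance (lines : List String) (max_samples : Option Int) (out : List String × List String) : Decidable (Spec_split_corpus lines max_samples out) := by unfold Spec_split_corpus; infer_instance

-- ===== CLAIM (what is proved, stated in full; the proofs are below) =====
def Claim_equal_split_corpus : Prop := ∀ (lines : List String) (max_samples : Option Int), Dom_split_corpus lines max_samples → Pre_split_corpus lines max_samples → Spec_split_corpus lines max_samples (split_corpus lines max_samples)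

-- ===== LEMMAS AND PROOFS =====

-- proof-only helper: the eval side of the loop, keyed by idx % 10
def evalOf : List String → Nat → List String
  | [], _ => []
  | x :: r, k => if k = 0 then x :: evalOf r ((k + 1) % 10) else evalOf r ((k + 1) % 10)

theorem stride10_nil : stride10 [] = [] := by rw [stride10.eq_def]

theorem stride10_cons (x : String) (r : List String) :
    stride10 (x :: r) = x :: stride10 (r.drop 9) := by rw [stride10.eq_def]

theorem evalOf_stride (l : List String) : ∀ k, k ≤ 9 → evalOf l k = stride10 (l.drop ((10 - k) % 10)) := by
  induction l with
  | nil => intro k _; simp [evalOf, stride10_nil]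
  | cons x r ih =>
    intro k hk
    by_cases h0 : k = 0
    · subst h0
      have h1 := ih 1 (by omega)
      norm_num at h1
      simp [evalOf, stride10_cons, h1]
    · have hdrop : (10 - k) % 10 = 10 - k := Nat.mod_eq_of_lt (by omega)
      rw [evalOf, if_neg h0, hdrop]
      have h1 : (x :: r).drop (10 - k) = r.drop (9 - k) := by
        have : 10 - k = (9 - k) + 1 := by omega
        simp [this]
      rw [h1]
      by_cases h9 : k = 9
      · subst h9
        have := ih 0 (by omega)
        simpa using this
      · have hk1 : (k + 1) % 10 = k + 1 := Nat.mod_eq_of_lt (by omega)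
        rw [hk1]
        have := ih (k + 1) (by omega)
        rw [this]
        congr 1
        have : (10 - (k + 1)) % 10 = 9 - k := by omega
        rw [this]

theorem splitA_go_none (l : List String) : ∀ idx tr ev,
    splitA_go none l idx tr ev = (tr ++ bTrain l idx, ev ++ evalOf l (idx % 10)) := by
  induction l with
  | nil => intro idx tr ev; simp [splitA_go, bTrain, evalOf]
  | cons x r ih =>
    intro idx tr ev
    have hm : (idx % 10 + 1) % 10 = (idx + 1) % 10 := by omega
    by_cases h : idx % 10 = 0
    · have h1 : (idx + 1) % 10 = 1 := by omega
      simp [splitA_go, bTrain, evalOf, h, ih, h1]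
    · simp [splitA_go, bTrain, evalOf, h, ih, hm]

theorem splitA_go_zero (l : List String) : ∀ idx tr ev,
    splitA_go (some 0) l idx tr ev = splitA_go none l idx tr ev := by
  induction l with
  | nil => intro idx tr ev; simp [splitA_go]
  | cons x r ih => intro idx tr ev; simp [splitA_go, ih]

theorem splitA_go_trunc (l : List String) : ∀ (m : Int) idx tr ev, m ≠ 0 →
    splitA_go (some m) l idx tr ev = splitA_go none (l.take (m.toNat - idx)) idx tr ev := by
  induction l with
  | nil => intro m idx tr ev _; simp [splitA_go]
  | cons x r ih =>
    intro m idx tr ev hm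
    by_cases hb : m ≤ (idx : Int)
    · have ht : m.toNat - idx = 0 := by omega
      simp [splitA_go, hm, hb, ht]
    · have ht : m.toNat - idx = (m.toNat - (idx + 1)) + 1 := by omega
      rw [ht]
      by_cases h : idx % 10 = 0
      · simp [splitA_go, hm, hb, h, ih _ _ _ _ hm]
      · simp [splitA_go, hm, hb, h, ih _ _ _ _ hm]

-- ===== VERDICT (by name: the statement is the Claim_ definition above) =====
theorem split_corpus_spec : Claim_equal_split_corpus := by
  intro lines ms _ _
  unfold Spec_split_corpus split_corpus split_corpus_alt
  have hev : ∀ l : List String, evalOf l 0 = stride10 l := by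
    intro l; simpa using evalOf_stride l 0 (by omega)
  cases ms with
  | none => simp [splitA_go_none, hev]
  | some m =>
    by_cases h0 : m = 0
    · subst h0; simp [splitA_go_zero, splitA_go_none, hev]
    · simp [h0, splitA_go_trunc lines m 0 [] [] h0, splitA_go_none, hev]
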